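-- pv_equiv track=rewrite | github.com/maq1017/VersaTerm | software/tools/render_viewdata_mosaic.py | glyph_to_lines
-- ===== SOURCE A (Python) =====
-- def glyph_to_lines(glyph, scale_x=2):
--     """Render glyph bytes as ASCII lines. Each pixel → scale_x chars."""
--     lines = []
--     for byte_val in glyph:
--         row = ''
--         for bit in range(7, -1, -1):
--             px = '█' if (byte_val >> bit) & 1 else '·'
--             row += px * scale_x
--         lines.append(row)
--     return lines
-- ===== SOURCE B (Python) =====
-- def glyph_to_lines(glyph, scale_x=2):
--     """Render glyph bytes as ASCII lines. Each pixel -> scale_x chars."""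
--     table = str.maketrans({'0': '\u00b7' * scale_x, '1': '\u2588' * scale_x})
--     return [format(b & 0xFF, '08b').translate(table) for b in glyph]
-- ===== Notes on version B (the rewrite author's own statement) =====
-- stated objective: idiomatic
-- what changed: Replaces the inner bit-by-bit shift/mask loop and string accumulation by formatting the low byte as an 8-digit binary string (format(b & 0xFF, '08b')) and substituting each digit via a translation table built once, in a list comprehension.
import Mathlib
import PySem

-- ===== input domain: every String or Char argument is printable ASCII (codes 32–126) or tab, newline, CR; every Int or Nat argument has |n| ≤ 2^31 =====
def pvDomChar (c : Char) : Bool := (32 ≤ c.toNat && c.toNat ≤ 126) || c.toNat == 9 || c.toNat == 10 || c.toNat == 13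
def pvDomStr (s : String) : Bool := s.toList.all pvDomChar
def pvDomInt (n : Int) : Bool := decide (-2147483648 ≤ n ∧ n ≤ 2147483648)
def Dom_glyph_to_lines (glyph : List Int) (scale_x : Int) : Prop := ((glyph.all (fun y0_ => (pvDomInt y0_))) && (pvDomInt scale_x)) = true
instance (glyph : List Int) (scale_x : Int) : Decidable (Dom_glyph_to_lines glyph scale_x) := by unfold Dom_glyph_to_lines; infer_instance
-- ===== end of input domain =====

-- B replaces the inner bit-by-bit shift/mask loop by formatting the low byte as an
-- 8-digit binary string and table-substituting each digit; objective: idiomatic.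

-- ===== PORT A =====
-- inner loop: for bit in range(7,-1,-1): row += px * scale_x  (row as List Char)
def glyph_to_lines_row (byte_val : Int) (scale_x : Int) : List Char :=
  (PySem.List.pyRange 7 (-1) (-1)).foldl
    (fun row bit =>
      row ++ PySem.List.pyRepeat
        [if PySem.Int.band (byte_val >>> bit.toNat) 1 = 1 then '█' else '·'] scale_x)
    []

def glyph_to_lines (glyph : List Int) (scale_x : Int) : List String :=
  glyph.foldl (fun lines byte_val => lines ++ [String.ofList (glyph_to_lines_row byte_val scale_x)]) []

-- ===== PORT B =====
-- format(b & 0xFF, '08b') : binary digits of the low byte, zero-padded to width 8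
def glyph_fmt08b (b : Int) : List Char :=
  PySem.Chars.zfill (Nat.toDigits 2 (PySem.Int.band b 255).toNat) 8

-- the maketrans table: '0' -> '·'*scale_x, '1' -> '█'*scale_x; translate = flatMap
def glyph_translate (scale_x : Int) (c : Char) : List Char :=
  List.replicate scale_x.toNat (if c = '1' then '█' else '·')

def glyph_to_lines_alt (glyph : List Int) (scale_x : Int) : List String :=
  glyph.map (fun b => String.ofList ((glyph_fmt08b b).flatMap (glyph_translate scale_x)))

-- ===== PRECONDITION & SPEC =====
def Spec_glyph_to_lines (glyph : List Int) (scale_x : Int) (out : List String) : Prop := out = glyph_to_lines_alt glyph scale_x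
instance (glyph : List Int) (scale_x : Int) (out : List String) : Decidable (Spec_glyph_to_lines glyph scale_x out) := by unfold Spec_glyph_to_lines; infer_instance

-- ===== CLAIM (what is proved, stated in full; the proofs are below) =====
def Claim_equal_glyph_to_lines : Prop := ∀ (glyph : List Int) (scale_x : Int), Dom_glyph_to_lines glyph scale_x → Spec_glyph_to_lines glyph scale_x (glyph_to_lines glyph scale_x)

-- ===== LEMMAS AND PROOFS =====

-- A's outer foldl-append loop is List.map
theorem glyph_foldl_append_map {α β : Type} (f : α → β) (xs : List α) (acc : List β) :
    xs.foldl (fun lines x => lines ++ [f x]) acc = acc ++ xs.map f := by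
  induction xs generalizing acc with
  | nil => simp
  | cons x xs ih => simp [List.foldl, ih]

-- b & 0xFF is the (always nonnegative) remainder mod 256
theorem glyph_band255 (b : Int) : PySem.Int.band b 255 = b % 256 := by
  unfold PySem.Int.band
  rw [show Int.toNat 255 = 255 from rfl]
  split_ifs with h h2 h3
  · rw [Nat.and_two_pow_sub_one_eq_mod b.toNat 8]; omega
  · omega
  · rw [Nat.land_comm, Nat.and_two_pow_sub_one_eq_mod _ 8]; omega
  · omega

-- the bit A extracts depends only on the low byte (k < 8)
theorem glyph_bit_eq (b : Int) (k : Nat) (hk : k < 8) :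
    PySem.Int.band (b >>> k) 1 = b % 256 / 2 ^ k % 2 := by
  rw [PySem.Int.band_one, Int.shiftRight_eq_div_pow]
  have h : ∀ a : Int, PySem.Int.mod a 2 = a % 2 := fun a => by
    simp [PySem.Int.mod, Int.fmod_eq_emod]
  rw [h]
  interval_cases k <;> norm_num <;> omega

-- format '08b' of a value < 256, characterised digit by digit (checked over all 256 bytes)
set_option maxRecDepth 4000 in
theorem glyph_fmt_chars_fin : ∀ m : Fin 256,
    PySem.Chars.zfill (Nat.toDigits 2 m.val) 8 =
      [7, 6, 5, 4, 3, 2, 1, 0].map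
        (fun k => if m.val / 2 ^ k % 2 = 1 then '1' else '0') := by decide

theorem glyph_fmt_chars (x : Nat) (hx : x < 256) :
    PySem.Chars.zfill (Nat.toDigits 2 x) 8 =
      [7, 6, 5, 4, 3, 2, 1, 0].map
        (fun k => if x / 2 ^ k % 2 = 1 then '1' else '0') :=
  glyph_fmt_chars_fin ⟨x, hx⟩

-- one pixel block: A's shift/mask repeat equals B's translated binary digit
theorem glyph_block_eq (b s : Int) (k : Nat) (hk : k < 8) :
    PySem.List.pyRepeat [if PySem.Int.band (b >>> (k : Int)) 1 = 1 then '█' else '·'] s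
      = glyph_translate s (if (b % 256).toNat / 2 ^ k % 2 = 1 then '1' else '0') := by
  rw [Int.shiftRight_natCast_right, PySem.List.pyRepeat_singleton, glyph_translate,
      glyph_bit_eq b k hk]
  have h0 : ((b % 256).toNat : Int) = b % 256 := by omega
  have hcast : (((b % 256).toNat / 2 ^ k % 2 : Nat) : Int) = b % 256 / 2 ^ k % 2 := by
    push_cast [h0]; ring
  have hIff : (b % 256 / 2 ^ k % 2 = 1) ↔ ((b % 256).toNat / 2 ^ k % 2 = 1) := by
    rw [← hcast]; norm_cast
  by_cases hc : (b % 256).toNat / 2 ^ k % 2 = 1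
  · rw [if_pos hc, if_pos (hIff.mpr hc)]; simp
  · rw [if_neg hc, if_neg (fun hh => hc (hIff.mp hh))]; simp

-- one full row
theorem glyph_row_eq (b s : Int) :
    glyph_to_lines_row b s = (glyph_fmt08b b).flatMap (glyph_translate s) := by
  have hm : (b % 256).toNat < 256 := by omega
  unfold glyph_to_lines_row glyph_fmt08b
  rw [glyph_band255,
      show PySem.List.pyRange 7 (-1) (-1) = [7, 6, 5, 4, 3, 2, 1, 0] from by decide,
      glyph_fmt_chars _ hm]
  simp only [List.foldl_cons, List.foldl_nil, List.map_cons, List.map_nil,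
    List.flatMap_cons, List.flatMap_nil, List.nil_append, List.append_nil,
    List.append_assoc]
  rw [show Int.toNat 7 = 7 from rfl, show Int.toNat 6 = 6 from rfl,
      show Int.toNat 5 = 5 from rfl, show Int.toNat 4 = 4 from rfl,
      show Int.toNat 3 = 3 from rfl, show Int.toNat 2 = 2 from rfl,
      show Int.toNat 1 = 1 from rfl, show Int.toNat 0 = 0 from rfl]
  rw [glyph_block_eq b s 7 (by norm_num), glyph_block_eq b s 6 (by norm_num),
      glyph_block_eq b s 5 (by norm_num), glyph_block_eq b s 4 (by norm_num),
      glyph_block_eq b s 3 (by norm_num), glyph_block_eq b s 2 (by norm_num),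
      glyph_block_eq b s 1 (by norm_num), glyph_block_eq b s 0 (by norm_num)]

-- ===== VERDICT (by name: the statement is the Claim_ definition above) =====
theorem glyph_to_lines_spec : Claim_equal_glyph_to_lines := by
  intro glyph scale_x _
  unfold Spec_glyph_to_lines glyph_to_lines glyph_to_lines_alt
  rw [glyph_foldl_append_map]
  simp [glyph_row_eq]
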